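-- pv_equiv track=rewrite | github.com/catanadj/taskwarrior-nautical | nautical_core/natural_language.py | describe_term_roll_shift
-- ===== SOURCE A (Python) =====
-- def describe_term_roll_shift(term) -> str | None:
--     saw = set()
--     for atom in term:
--         roll = (atom.get("mods") or {}).get("roll")
--         if roll in ("nw", "pbd", "nbd"):
--             saw.add(roll)
--     if "nw" in saw:
--         return "nw"
--     if "pbd" in saw:
--         return "pbd"
--     if "nbd" in saw:
--         return "nbd"
--     return None
-- ===== SOURCE B (Python) =====
-- def describe_term_roll_shift(term) -> str | None:
--     best = None
--     for atom in term:
--         roll = (atom.get("mods") or {}).get("roll")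
--         if roll == "nw":
--             return "nw"
--         if roll == "pbd":
--             best = "pbd"
--         elif roll == "nbd" and best is None:
--             best = "nbd"
--     return best
-- ===== Notes on version B (the rewrite author's own statement) =====
-- stated objective: simpler
-- what changed: Replaced the collect-into-a-set-then-three-membership-checks pass with a single incremental pass keeping one running-best variable and returning 'nw' immediately when seen.
import Mathlib
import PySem

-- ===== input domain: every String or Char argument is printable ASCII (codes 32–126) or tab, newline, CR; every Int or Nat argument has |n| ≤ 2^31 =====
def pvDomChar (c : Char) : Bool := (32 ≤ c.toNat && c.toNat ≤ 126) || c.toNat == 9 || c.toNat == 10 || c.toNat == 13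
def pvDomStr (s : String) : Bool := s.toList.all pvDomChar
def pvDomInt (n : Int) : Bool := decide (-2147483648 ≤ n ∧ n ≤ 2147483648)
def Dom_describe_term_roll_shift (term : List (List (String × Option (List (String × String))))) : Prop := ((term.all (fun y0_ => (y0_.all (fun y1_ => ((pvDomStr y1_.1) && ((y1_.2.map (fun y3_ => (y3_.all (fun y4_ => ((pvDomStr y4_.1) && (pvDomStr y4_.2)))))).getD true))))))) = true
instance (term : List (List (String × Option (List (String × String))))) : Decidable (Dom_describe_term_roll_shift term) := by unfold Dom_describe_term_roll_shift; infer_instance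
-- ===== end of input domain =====

-- B replaces A's collect-into-a-set-then-three-membership-checks with a single incremental
-- pass keeping one running-best variable (early return on "nw"); objective: simpler.

-- ===== PORT A =====
-- roll = (atom.get("mods") or {}).get("roll")   (shared by both Pythons verbatim)
-- dict.get on the association-list encoding: first match (exact for Python dicts, whose keys are unique)
def pvAssocGet? {v : Type} (d : List (String × v)) (k : String) : Option v :=
  match d with
  | [] => none
  | (k', x) :: rest => if k' = k then some x else pvAssocGet? rest k

def pvRoll (atom : List (String × Option (List (String × String)))) : Option String :=
  let mods : List (String × String) :=
    match pvAssocGet? atom "mods" with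
    | some (some d) => d
    | _ => []
  pvAssocGet? mods "roll"

-- the loop body: if roll in ("nw","pbd","nbd"): saw.add(roll)
def pvStepA (saw : PySem.Set String) (atom : List (String × Option (List (String × String)))) : PySem.Set String :=
  match pvRoll atom with
  | some "nw" => PySem.Set.add saw "nw"
  | some "pbd" => PySem.Set.add saw "pbd"
  | some "nbd" => PySem.Set.add saw "nbd"
  | _ => saw

def describe_term_roll_shift (term : List (List (String × Option (List (String × String))))) : Option String :=
  let saw := term.foldl pvStepA PySem.Set.empty
  if PySem.Set.contains saw "nw" then some "nw"
  else if PySem.Set.contains saw "pbd" then some "pbd"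
  else if PySem.Set.contains saw "nbd" then some "nbd"
  else none

-- ===== PORT B =====
def pvLoopB (best : Option String) : List (List (String × Option (List (String × String)))) → Option String
  | [] => best
  | atom :: rest =>
    match pvRoll atom with
    | some "nw" => some "nw"
    | some "pbd" => pvLoopB (some "pbd") rest
    | some "nbd" => pvLoopB (if best = none then some "nbd" else best) rest
    | _ => pvLoopB best rest

def describe_term_roll_shift_alt (term : List (List (String × Option (List (String × String))))) : Option String :=
  pvLoopB none term

-- ===== PRECONDITION & SPEC =====
-- Pre_ only restricts the association-list ENCODING to lists that represent Python dicts (duplicate-free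
-- keys for each atom and for any dict stored under the "mods" key); no actual Python input is excluded,
-- since a Python dict cannot carry duplicate keys.
def Pre_describe_term_roll_shift (term : List (List (String × Option (List (String × String))))) : Prop :=
  ∀ atom ∈ term, (atom.map Prod.fst).Nodup ∧
    ∀ kv ∈ atom, kv.1 = "mods" → ∀ d ∈ kv.2, (d.map Prod.fst).Nodup
instance (term : List (List (String × Option (List (String × String))))) : Decidable (Pre_describe_term_roll_shift term) := by unfold Pre_describe_term_roll_shift; infer_instance
def pvWitness_describe_term_roll_shift : (List (List (String × Option (List (String × String))))) := [[("mods", some [("roll", "pbd")])]]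
def Spec_describe_term_roll_shift (term : List (List (String × Option (List (String × String))))) (out : Option String) : Prop := out = describe_term_roll_shift_alt term
instance (term : List (List (String × Option (List (String × String))))) (out : Option String) : Decidable (Spec_describe_term_roll_shift term out) := by unfold Spec_describe_term_roll_shift; infer_instance

-- ===== CLAIM (what is proved, stated in full; the proofs are below) =====
def Claim_equal_describe_term_roll_shift : Prop := ∀ (term : List (List (String × Option (List (String × String))))), Dom_describe_term_roll_shift term → Pre_describe_term_roll_shift term → Spec_describe_term_roll_shift term (describe_term_roll_shift term)

-- ===== LEMMAS AND PROOFS =====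

-- A's final set-to-answer reduction, as a function of the finished set
def pvReduceA (saw : PySem.Set String) : Option String :=
  if PySem.Set.contains saw "nw" then some "nw"
  else if PySem.Set.contains saw "pbd" then some "pbd"
  else if PySem.Set.contains saw "nbd" then some "nbd"
  else none

-- B's running best, as a function of the set A has accumulated so far
def pvBestOf (saw : PySem.Set String) : Option String :=
  if "pbd" ∈ saw then some "pbd" else if "nbd" ∈ saw then some "nbd" else none

theorem pv_mem_add (s : PySem.Set String) (x y : String) (h : x ∈ s) : x ∈ PySem.Set.add s y := by
  simp [PySem.Set.mem_add, h]

theorem pv_mem_add_self (s : PySem.Set String) (y : String) : y ∈ PySem.Set.add s y := by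
  simp [PySem.Set.mem_add]

theorem pv_mem_step (saw : PySem.Set String) (atom : List (String × Option (List (String × String)))) (x : String) (h : x ∈ saw) : x ∈ pvStepA saw atom := by
  unfold pvStepA
  split <;> first | exact pv_mem_add _ _ _ h | exact h

theorem pv_mem_foldl (rest : List (List (String × Option (List (String × String))))) : ∀ (saw : PySem.Set String) (x : String), x ∈ saw → x ∈ rest.foldl pvStepA saw := by
  induction rest with
  | nil => intro saw x h; simpa using h
  | cons a t ih => intro saw x h; exact ih _ _ (pv_mem_step _ _ _ h)

theorem pv_reduce_nw (saw : PySem.Set String) (h : "nw" ∈ saw) : pvReduceA saw = some "nw" := by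
  unfold pvReduceA
  simp [h]

theorem pv_key (rest : List (List (String × Option (List (String × String))))) : ∀ (saw : PySem.Set String), "nw" ∉ saw → pvReduceA (rest.foldl pvStepA saw) = pvLoopB (pvBestOf saw) rest := by
  induction rest with
  | nil =>
    intro saw hnw
    simp only [List.foldl_nil, pvLoopB]
    unfold pvReduceA pvBestOf
    simp [hnw]
  | cons a t ih =>
    intro saw hnw
    simp only [List.foldl_cons, pvLoopB]
    rcases hr : pvRoll a with _ | r
    · rw [show pvStepA saw a = saw from by simp [pvStepA, hr]]
      exact ih saw hnw
    · by_cases h1 : r = "nw"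
      · subst h1
        rw [show pvStepA saw a = PySem.Set.add saw "nw" from by simp [pvStepA, hr]]
        exact pv_reduce_nw _ (pv_mem_foldl _ _ _ (pv_mem_add_self _ _))
      · by_cases h2 : r = "pbd"
        · subst h2
          rw [show pvStepA saw a = PySem.Set.add saw "pbd" from by simp [pvStepA, hr]]
          have hnw2 : "nw" ∉ PySem.Set.add saw "pbd" := by
            simp [PySem.Set.mem_add, hnw]
          rw [ih _ hnw2]
          rw [show (match (some "pbd" : Option String) with
            | some "nw" => some "nw"
            | some "pbd" => pvLoopB (some "pbd") t
            | some "nbd" => pvLoopB (if pvBestOf saw = none then some "nbd" else pvBestOf saw) t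
            | _ => pvLoopB (pvBestOf saw) t) = pvLoopB (some "pbd") t from rfl]
          congr 1
          unfold pvBestOf
          simp [PySem.Set.mem_add]
        · by_cases h3 : r = "nbd"
          · subst h3
            rw [show pvStepA saw a = PySem.Set.add saw "nbd" from by simp [pvStepA, hr]]
            have hnw2 : "nw" ∉ PySem.Set.add saw "nbd" := by
              simp [PySem.Set.mem_add, hnw]
            rw [ih _ hnw2]
            rw [show (match (some "nbd" : Option String) with
              | some "nw" => some "nw"
              | some "pbd" => pvLoopB (some "pbd") t
              | some "nbd" => pvLoopB (if pvBestOf saw = none then some "nbd" else pvBestOf saw) t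
              | _ => pvLoopB (pvBestOf saw) t) = pvLoopB (if pvBestOf saw = none then some "nbd" else pvBestOf saw) t from rfl]
            congr 1
            unfold pvBestOf
            by_cases hp : "pbd" ∈ saw
            · simp [pv_mem_add _ _ _ hp, hp]
            · have hp2 : "pbd" ∉ PySem.Set.add saw "nbd" := by
                simp [PySem.Set.mem_add, hp]
              simp [hp, hp2, PySem.Set.mem_add]
          · rw [show pvStepA saw a = saw from by
              simp only [pvStepA, hr]
              split <;> simp_all]
            rw [show (match (some r : Option String) with
              | some "nw" => some "nw"
              | some "pbd" => pvLoopB (some "pbd") t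
              | some "nbd" => pvLoopB (if pvBestOf saw = none then some "nbd" else pvBestOf saw) t
              | _ => pvLoopB (pvBestOf saw) t) = pvLoopB (pvBestOf saw) t from by
              split <;> simp_all]
            exact ih saw hnw

-- ===== VERDICT (by name: the statement is the Claim_ definition above) =====
theorem describe_term_roll_shift_spec : Claim_equal_describe_term_roll_shift := by
  intro term _ _
  unfold Spec_describe_term_roll_shift describe_term_roll_shift describe_term_roll_shift_alt
  have := pv_key term PySem.Set.empty (by simp [PySem.Set.empty])
  simpa [pvReduceA, pvBestOf, PySem.Set.empty] using this
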